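-- pv_equiv track=rewrite | github.com/skpradhan1/python_practice | CodingPattern/cyclicsort/find_k_missing_nbrs.py | find_first_k_missing_positive
-- ===== SOURCE A (Python) =====
-- def find_first_k_missing_positive(nums, k):
--     missingNumbers = []
--     i, n = 0, len(nums)
--     while i < n:
--         j = nums[i] - 1
--         if nums[i] > 0 and nums[i] <= n and nums[i] != nums[j]:
--             nums[i], nums[j] = nums[j], nums[i]  # swap
--         else:
--             i += 1
--
--     for i in range(n):
--         if len(missingNumbers) < k:
--             if nums[i] != i+1:
--                 missingNumbers.append(i+1)
--
--     last_ele = max(nums)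
--
--     while len(missingNumbers) < k:
--         missingNumbers.append(last_ele+1)
--         last_ele +=1
--     return missingNumbers
-- ===== SOURCE B (Python) =====
-- def find_first_k_missing_positive(nums, k):
--     seen = set(nums)
--     res = []
--     for i in range(1, len(nums) + 1):
--         if len(res) < k and i not in seen:
--             res.append(i)
--     last = max(nums)
--     while len(res) < k:
--         res.append(last + 1)
--         last += 1
--     return res
-- ===== Notes on version B (the rewrite author's own statement) =====
-- stated objective: simpler
-- what changed: replaces A's in-place cyclic sort followed by a position scan with a single membership set of the original list scanned over 1..n (same max(nums)+1 tail), without mutating the argument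
import Mathlib
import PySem

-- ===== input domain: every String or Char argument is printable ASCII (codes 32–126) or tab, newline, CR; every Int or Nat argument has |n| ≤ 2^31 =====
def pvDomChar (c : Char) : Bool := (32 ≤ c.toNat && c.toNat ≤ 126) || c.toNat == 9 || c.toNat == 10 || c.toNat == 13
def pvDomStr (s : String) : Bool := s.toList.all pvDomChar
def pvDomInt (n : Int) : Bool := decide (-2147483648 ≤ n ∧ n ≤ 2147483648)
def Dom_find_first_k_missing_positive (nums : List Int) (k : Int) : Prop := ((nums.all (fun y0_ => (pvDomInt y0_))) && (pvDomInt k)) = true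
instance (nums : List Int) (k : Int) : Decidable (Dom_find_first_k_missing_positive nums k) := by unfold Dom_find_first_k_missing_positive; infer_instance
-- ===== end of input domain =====

-- B replaces A's in-place cyclic sort with a one-pass scan over a membership set of the
-- original list (objective: simpler). Python A mutates its `nums` argument in place;
-- B does not; the equivalence proved here is about the RETURN value only.

-- ===== PORT A =====
-- getD of a two-position swap (used by the cyclic-sort loop's measure and invariant)
theorem pvSwapGet_j (a : List Int) (i j : Nat) (w v : Int) (hj : j < a.length) :
    ((a.set i w).set j v).getD j 0 = v := by
  rw [List.getD_eq_getElem _ _ (by simpa using hj)]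
  simp

theorem pvSwapGet_i (a : List Int) (i j : Nat) (w v : Int) (hi : i < a.length)
    (hij : i ≠ j) : ((a.set i w).set j v).getD i 0 = w := by
  rw [List.getD_eq_getElem _ _ (by simpa using hi)]
  simp [List.getElem_set, Ne.symm hij, hij]

theorem pvSwapGet_other (a : List Int) (i j : Nat) (w v : Int) (x : Nat)
    (hxi : x ≠ i) (hxj : x ≠ j) : ((a.set i w).set j v).getD x 0 = a.getD x 0 := by
  by_cases hx : x < a.length
  · rw [List.getD_eq_getElem _ _ (by simpa using hx), List.getD_eq_getElem _ _ hx]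
    simp [List.getElem_set, Ne.symm hxi, Ne.symm hxj]
  · rw [List.getD_eq_default _ _ (by simpa using Nat.le_of_not_lt hx),
        List.getD_eq_default _ _ (Nat.le_of_not_lt hx)]

-- measure for the cyclic-sort while loop: number of positions not holding their value
def pvUnfixed (a : List Int) : Nat :=
  ∑ x ∈ Finset.range a.length, (if a.getD x 0 = (x : Int) + 1 then 0 else 1)

-- the swap of A's while loop strictly decreases the measure (cited by decreasing_by)
theorem pvUnfixed_swap_lt (a : List Int) (i : Nat) (hi : i < a.length)
    (h1 : 0 < a.getD i 0) (h2 : a.getD i 0 ≤ (a.length : Int))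
    (h3 : a.getD i 0 ≠ a.getD (a.getD i 0 - 1).toNat 0) :
    pvUnfixed ((a.set i (a.getD (a.getD i 0 - 1).toNat 0)).set (a.getD i 0 - 1).toNat (a.getD i 0)) < pvUnfixed a := by
  have hj : (a.getD i 0 - 1).toNat < a.length := by omega
  have hij : i ≠ (a.getD i 0 - 1).toNat := by
    intro he; exact h3 (by rw [← he])
  unfold pvUnfixed
  rw [List.length_set, List.length_set]
  apply Finset.sum_lt_sum
  · intro x hx
    by_cases hxj : x = (a.getD i 0 - 1).toNat
    · rw [hxj, pvSwapGet_j _ _ _ _ _ hj]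
      have he1 : a.getD i 0 = ((a.getD i 0 - 1).toNat : Int) + 1 := by omega
      rw [if_pos he1]
      omega
    · by_cases hxi : x = i
      · rw [hxi, pvSwapGet_i _ _ _ _ _ hi hij]
        have hne : a.getD i 0 ≠ (i : Int) + 1 := by
          intro he; exact hij (by omega)
        rw [if_neg hne]
        split <;> omega
      · rw [pvSwapGet_other _ _ _ _ _ _ hxi hxj]
  · refine ⟨(a.getD i 0 - 1).toNat, Finset.mem_range.mpr hj, ?_⟩
    rw [pvSwapGet_j _ _ _ _ _ hj]
    have he1 : a.getD i 0 = (((a.getD i 0 - 1).toNat : Int)) + 1 := by omega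
    have he2 : a.getD (a.getD i 0 - 1).toNat 0 ≠ (((a.getD i 0 - 1).toNat : Int)) + 1 := by
      intro he; exact h3 (by omega)
    rw [if_pos he1, if_neg he2]
    omega

-- the while loop of A: i advances or a swap fixes one more position (totality guard h)
def pvCyclic (a : List Int) (i n : Nat) (h : a.length = n) : List Int :=
  if hi : i < n then
    let v := a.getD i 0
    if hc : 0 < v ∧ v ≤ (n : Int) ∧ v ≠ a.getD (v - 1).toNat 0 then
      pvCyclic ((a.set i (a.getD (v - 1).toNat 0)).set (v - 1).toNat v) i n
        (by simp [h])
    else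
      pvCyclic a (i + 1) n h
  else a
termination_by (pvUnfixed a, n - i)
decreasing_by
  · exact Prod.Lex.left _ _
      (pvUnfixed_swap_lt a i (by omega) hc.1 (by rw [h]; exact hc.2.1) hc.2.2)
  · exact Prod.Lex.right _ (by omega)

-- the tail while loop of A: append successors of last_ele until k results
def pvTailA (missing : List Int) (last k : Int) : List Int :=
  if (missing.length : Int) < k then
    pvTailA (missing ++ [last + 1]) (last + 1) k
  else missing
termination_by (k - (missing.length : Int)).toNat
decreasing_by simp; omega

def find_first_k_missing_positive (nums : List Int) (k : Int) : List Int :=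
  let n := nums.length
  let r := pvCyclic nums 0 n rfl
  let missing := (List.range n).foldl
    (fun acc i =>
      if (acc.length : Int) < k then
        if r.getD i 0 ≠ (i : Int) + 1 then acc ++ [(i : Int) + 1] else acc
      else acc) []
  match PySem.List.max? r (fun x => x) with
  | none => []          -- Python raises ValueError here (nums = []); excluded by Pre_
  | some last => pvTailA missing last k

-- ===== PORT B =====
-- the tail while loop of B: last += 1 then append
def pvTailB (res : List Int) (last k : Int) : List Int :=
  if (res.length : Int) < k then
    pvTailB (res ++ [last + 1]) (last + 1) k
  else res
termination_by (k - (res.length : Int)).toNat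
decreasing_by simp; omega

def find_first_k_missing_positive_alt (nums : List Int) (k : Int) : List Int :=
  let seen := PySem.Set.ofList nums
  let res := (PySem.List.pyRange 1 ((nums.length : Int) + 1) 1).foldl
    (fun acc i =>
      if (acc.length : Int) < k ∧ PySem.Set.contains seen i = false then acc ++ [i]
      else acc) []
  match PySem.List.max? nums (fun x => x) with
  | none => []          -- Python raises ValueError here (nums = []); excluded by Pre_
  | some last => pvTailB res last k

-- ===== PRECONDITION & SPEC =====
-- Pre_ excludes only nums = [], on which both A and B raise ValueError at max(nums)
def Pre_find_first_k_missing_positive (nums : List Int) (k : Int) : Prop := nums ≠ []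
instance (nums : List Int) (k : Int) : Decidable (Pre_find_first_k_missing_positive nums k) := by unfold Pre_find_first_k_missing_positive; infer_instance
def pvWitness_find_first_k_missing_positive : List Int × Int := ([3, 1, 7], 4)

def Spec_find_first_k_missing_positive (nums : List Int) (k : Int) (out : List Int) : Prop := out = find_first_k_missing_positive_alt nums k
instance (nums : List Int) (k : Int) (out : List Int) : Decidable (Spec_find_first_k_missing_positive nums k out) := by unfold Spec_find_first_k_missing_positive; infer_instance

-- ===== CLAIM (what is proved, stated in full; the proofs are below) =====
def Claim_equal_find_first_k_missing_positive : Prop := ∀ (nums : List Int) (k : Int), Dom_find_first_k_missing_positive nums k → Pre_find_first_k_missing_positive nums k → Spec_find_first_k_missing_positive nums k (find_first_k_missing_positive nums k)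

-- ===== LEMMAS AND PROOFS =====

-- invariant of the cyclic-sort loop: every processed position j < i either holds a value
-- outside [1, n] or its value v occupies position v-1
def pvInv (a : List Int) (n i : Nat) : Prop :=
  ∀ j, j < i → 0 < a.getD j 0 → a.getD j 0 ≤ (n : Int) →
    a.getD (a.getD j 0 - 1).toNat 0 = a.getD j 0

theorem pvCyclic_spec (a : List Int) (i n : Nat) (h : a.length = n) (hInv : pvInv a n i) :
    (pvCyclic a i n h).length = n ∧ (pvCyclic a i n h).Perm a ∧ pvInv (pvCyclic a i n h) n n := by
  induction a, i, h using pvCyclic.induct n with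
  | case1 a i h hi v hc ih =>
    have hj : (v - 1).toNat < a.length := by
      have h1 := hc.1; have h2 := hc.2.1; omega
    have hij : i ≠ (v - 1).toNat := fun he => hc.2.2 (by rw [← he])
    have hInv' : pvInv ((a.set i (a.getD (v - 1).toNat 0)).set (v - 1).toNat v) n i := by
      intro j hji hpos hle
      have hjn : j < a.length := by omega
      have hjne_i : j ≠ i := by omega
      by_cases hjj : j = (v - 1).toNat
      · rw [hjj, pvSwapGet_j _ _ _ _ _ hj]
        exact pvSwapGet_j _ _ _ _ _ hj
      · rw [pvSwapGet_other _ _ _ _ _ _ hjne_i hjj] at hpos hle ⊢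
        have htgt : a.getD (a.getD j 0 - 1).toNat 0 = a.getD j 0 := hInv j hji hpos hle
        by_cases htj : (a.getD j 0 - 1).toNat = (v - 1).toNat
        · have huv : a.getD j 0 = v := by have h1 := hc.1; omega
          rw [htj, pvSwapGet_j _ _ _ _ _ hj]
          exact huv.symm
        · have hti : (a.getD j 0 - 1).toNat ≠ i := by
            intro he
            apply htj
            have h1 : a.getD i 0 = a.getD j 0 := by rw [← he]; exact htgt
            have h2 : a.getD j 0 = v := h1.symm
            rw [h2]
          rw [pvSwapGet_other _ _ _ _ _ _ hti htj, htgt]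
    rw [pvCyclic, dif_pos hi, dif_pos hc]
    obtain ⟨hl, hp, hv⟩ := ih hInv'
    have hperm' : ((a.set i (a.getD (v - 1).toNat 0)).set (v - 1).toNat v).Perm a := by
      have hi' : i < a.length := by omega
      have e1 : v = a[i] := List.getD_eq_getElem _ _ hi'
      have e2 : a.getD (v - 1).toNat 0 = a[(v - 1).toNat] := List.getD_eq_getElem _ _ hj
      have key : ∀ (x y : Int), x = a[i] → y = a[(v - 1).toNat] →
          ((a.set i y).set (v - 1).toNat x).Perm a := by
        intro x y hx hy
        subst hx; subst hy
        exact List.set_set_perm hi' hj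
      exact key v (a.getD (v - 1).toNat 0) e1 e2
    exact ⟨hl, hp.trans hperm', hv⟩
  | case2 a i h hi v hc ih =>
    rw [pvCyclic, dif_pos hi, dif_neg hc]
    apply ih
    intro j hji hpos hle
    by_cases hj : j = i
    · by_contra hne
      apply hc
      refine ⟨?_, ?_, ?_⟩
      · show (0 : Int) < a.getD i 0
        rw [← hj]; exact hpos
      · show a.getD i 0 ≤ (n : Int)
        rw [← hj]; exact hle
      · intro he
        apply hne
        show a.getD (a.getD j 0 - 1).toNat 0 = a.getD j 0
        rw [hj]
        exact he.symm
    · exact hInv j (by omega) hpos hle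
  | case3 a i h hi =>
    rw [pvCyclic, dif_neg hi]
    exact ⟨h, List.Perm.refl a, fun j hj hpos hle => hInv j (by omega) hpos hle⟩

-- characterization of the cyclically sorted list: position i holds i+1 exactly when i+1 occurs in nums
theorem pvFixed_iff (r nums : List Int) (n : Nat) (hlen : r.length = n)
    (hperm : r.Perm nums) (hInv : pvInv r n n) (i : Nat) (hi : i < n) :
    (r.getD i 0 = (i : Int) + 1) ↔ ((i : Int) + 1) ∈ nums := by
  constructor
  · intro he
    have hmem : r.getD i 0 ∈ r := by
      rw [List.getD_eq_getElem _ _ (by omega)]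
      exact List.getElem_mem _
    rw [he] at hmem
    exact hperm.mem_iff.mp hmem
  · intro hm
    have hmr : ((i : Int) + 1) ∈ r := hperm.mem_iff.mpr hm
    obtain ⟨j, hjlt, hje⟩ := List.getElem_of_mem hmr
    have hjd : r.getD j 0 = (i : Int) + 1 := by
      rw [List.getD_eq_getElem _ _ hjlt, hje]
    have hres := hInv j (by omega) (by rw [hjd]; omega) (by rw [hjd]; omega)
    rw [hjd] at hres
    have ht : ((i : Int) + 1 - 1).toNat = i := by omega
    rw [ht] at hres
    exact hres

-- the two tail loops compute the same list
theorem pvTail_eq (k : Int) (missing : List Int) (last : Int) :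
    pvTailA missing last k = pvTailB missing last k := by
  induction missing, last using pvTailA.induct k with
  | case1 missing last hlt ih =>
    rw [pvTailA, pvTailB, if_pos hlt, if_pos hlt, ih]
  | case2 missing last hlt =>
    rw [pvTailA, pvTailB, if_neg hlt, if_neg hlt]

-- equal max values for lists with the same members
theorem pvMax_eq (xs ys : List Int) (h : ∀ x, x ∈ xs ↔ x ∈ ys) :
    PySem.List.max? xs (fun x => x) = PySem.List.max? ys (fun x => x) := by
  cases hx : PySem.List.max? xs (fun x => x) with
  | none =>
    rw [PySem.List.max?_eq_none_iff] at hx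
    subst hx
    rw [Eq.comm, PySem.List.max?_eq_none_iff]
    apply List.eq_nil_iff_forall_not_mem.mpr
    intro x hxm
    exact (List.not_mem_nil (a := x)) ((h x).mpr hxm)
  | some m =>
    cases hy : PySem.List.max? ys (fun x => x) with
    | none =>
      rw [PySem.List.max?_eq_none_iff] at hy
      subst hy
      exact absurd ((h m).mp (PySem.List.max?_mem hx)) List.not_mem_nil
    | some m' =>
      have h1 : m ≤ m' := PySem.List.max?_isMax hy m ((h m).mp (PySem.List.max?_mem hx))
      have h2 : m' ≤ m := PySem.List.max?_isMax hx m' ((h m').mpr (PySem.List.max?_mem hy))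
      rw [le_antisymm h1 h2]

-- ===== VERDICT (by name: the statement is the Claim_ definition above) =====
theorem find_first_k_missing_positive_spec : Claim_equal_find_first_k_missing_positive := by
  intro nums k _ hpre
  unfold Spec_find_first_k_missing_positive
  obtain ⟨hlen, hperm, hInv⟩ :=
    pvCyclic_spec nums 0 nums.length rfl (by intro j hj; omega)
  simp only [find_first_k_missing_positive, find_first_k_missing_positive_alt]
  have hfold :
      (List.range nums.length).foldl
        (fun acc i =>
          if (acc.length : Int) < k then
            if (pvCyclic nums 0 nums.length rfl).getD i 0 ≠ (i : Int) + 1 then acc ++ [(i : Int) + 1] else acc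
          else acc) [] =
      (PySem.List.pyRange 1 ((nums.length : Int) + 1) 1).foldl
        (fun acc i =>
          if (acc.length : Int) < k ∧ PySem.Set.contains (PySem.Set.ofList nums) i = false then acc ++ [i]
          else acc) [] := by
    rw [PySem.List.pyRange_one]
    have hn' : (((nums.length : Int) + 1 - 1)).toNat = nums.length := by omega
    rw [hn', List.foldl_map]
    apply PySem.List.foldl_congr_mem
    intro acc x hx
    have hxn : x < nums.length := List.mem_range.mp hx
    have hiff := pvFixed_iff _ nums nums.length hlen hperm hInv x hxn
    have hcont : PySem.Set.contains (PySem.Set.ofList nums) (1 + (x : Int)) = false ↔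
        ¬ ((x : Int) + 1) ∈ nums := by
      rw [show (1 : Int) + (x : Int) = (x : Int) + 1 from by ring]
      rw [← PySem.Set.mem_ofList nums ((x : Int) + 1), ← PySem.Set.contains_iff]
      cases PySem.Set.contains (PySem.Set.ofList nums) ((x : Int) + 1) <;> simp
    by_cases hk : (acc.length : Int) < k
    · by_cases hne : (pvCyclic nums 0 nums.length rfl).getD x 0 ≠ (x : Int) + 1
      · rw [if_pos hk, if_pos hne, if_pos ⟨hk, hcont.mpr (fun hm => hne (hiff.mpr hm))⟩]
        rw [show (1 : Int) + (x : Int) = (x : Int) + 1 from by ring]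
      · push_neg at hne
        rw [if_pos hk, if_neg (not_not_intro hne), if_neg ?_]
        intro hand
        exact (hcont.mp hand.2) (hiff.mp hne)
    · rw [if_neg hk, if_neg (fun hc => hk hc.1)]
  rw [hfold]
  rw [pvMax_eq (pvCyclic nums 0 nums.length rfl) nums (fun x => hperm.mem_iff)]
  cases hm : PySem.List.max? nums (fun x => x) with
  | none =>
    exact absurd ((PySem.List.max?_eq_none_iff nums _).mp hm) hpre
  | some last =>
    exact pvTail_eq k _ last
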